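-- pv_equiv track=rewrite | github.com/tom-code/rust-matc | src/clusters/gen/orchestrate.py | _generate_cluster_dispatcher
-- ===== SOURCE A (Python) =====
-- from typing import Dict, List
--
-- def _generate_cluster_dispatcher(cluster_info: List[Dict[str, str]], dispatcher_type: str) -> str:
--     """Generate a cluster dispatcher function (either command or attribute).
--
--     Args:
--         cluster_info: List of cluster information dictionaries
--         dispatcher_type: Either "command" or "attribute"
--
--     Returns:
--         Generated dispatcher function code
--     """
--     if dispatcher_type == "command":
--         function_name = "decode_attribute_json"
--         function_call = "decode_attribute_json(cluster_id, attribute_id, tlv_value)"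
--         doc_title = "Main dispatcher function for decoding attributes to JSON"
--         doc_desc = """This function routes to the appropriate cluster-specific decoder based on cluster ID.
-- ///
-- /// # Parameters
-- /// * `cluster_id` - The cluster identifier
-- /// * `attribute_id` - The attribute identifier
-- /// * `tlv_value` - The TLV value to decode
-- ///
-- /// # Returns
-- /// JSON string representation of the decoded value or error message"""
--         signature = "pub fn decode_attribute_json(cluster_id: u32, attribute_id: u32, tlv_value: &crate::tlv::TlvItemValue) -> String"
--         error_msg = 'format!("{{\\\"error\\\": \\\"Unsupported cluster ID: {}\\\"}}", cluster_id)'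
--     else:  # attribute
--         function_name = "get_attribute_list"
--         function_call = "get_attribute_list()"
--         doc_title = "Main dispatcher function for getting attribute lists"
--         doc_desc = """This function routes to the appropriate cluster-specific attribute list based on cluster ID.
-- ///
-- /// # Parameters
-- /// * `cluster_id` - The cluster identifier
-- ///
-- /// # Returns
-- /// Vector of tuples containing (attribute_id, attribute_name) or empty vector if unsupported"""
--         signature = "pub fn get_attribute_list(cluster_id: u32) -> Vec<(u32, &'static str)>"
--         error_msg = "vec![]"
--
--     # Build match arms for each cluster that has attributes, avoiding duplicates
--     seen_cluster_ids = set()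
--     match_arms = []
--
--     for info in sorted(cluster_info, key=lambda x: x['cluster_id']):
--         if info['has_attributes'] and info['cluster_id'] not in seen_cluster_ids:
--             match_arms.append(f"        {info['cluster_id']} => {info['module_name']}::{function_call},")
--             seen_cluster_ids.add(info['cluster_id'])
--     match_arms_str = '\n'.join(match_arms)
--
--     dispatcher_function = f'''
-- /// {doc_title}
-- ///
-- /// {doc_desc}
-- {signature} {{
--     match cluster_id {{
-- {match_arms_str}
--         _ => {error_msg},
--     }}
-- }}
-- '''
--
--     return dispatcher_function
-- ===== SOURCE B (Python) =====
-- def _generate_cluster_dispatcher(cluster_info, dispatcher_type):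
--     """Single pass over cluster_info in original order building a cluster_id -> module_name
--     table (first qualifying entry wins), then emit one match arm per sorted cluster_id."""
--     if dispatcher_type == "command":
--         function_call = "decode_attribute_json(cluster_id, attribute_id, tlv_value)"
--         doc_title = "Main dispatcher function for decoding attributes to JSON"
--         doc_desc = """This function routes to the appropriate cluster-specific decoder based on cluster ID.
-- ///
-- /// # Parameters
-- /// * `cluster_id` - The cluster identifier
-- /// * `attribute_id` - The attribute identifier
-- /// * `tlv_value` - The TLV value to decode
-- ///
-- /// # Returns
-- /// JSON string representation of the decoded value or error message"""
--         signature = "pub fn decode_attribute_json(cluster_id: u32, attribute_id: u32, tlv_value: &crate::tlv::TlvItemValue) -> String"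
--         error_msg = 'format!("{{\\\"error\\\": \\\"Unsupported cluster ID: {}\\\"}}", cluster_id)'
--     else:  # attribute
--         function_call = "get_attribute_list()"
--         doc_title = "Main dispatcher function for getting attribute lists"
--         doc_desc = """This function routes to the appropriate cluster-specific attribute list based on cluster ID.
-- ///
-- /// # Parameters
-- /// * `cluster_id` - The cluster identifier
-- ///
-- /// # Returns
-- /// Vector of tuples containing (attribute_id, attribute_name) or empty vector if unsupported"""
--         signature = "pub fn get_attribute_list(cluster_id: u32) -> Vec<(u32, &'static str)>"
--         error_msg = "vec![]"
--
--     seen = {}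
--     for info in cluster_info:
--         if info['has_attributes'] and info['cluster_id'] not in seen:
--             seen[info['cluster_id']] = info['module_name']
--
--     match_arms_str = '\n'.join(
--         f"        {cid} => {seen[cid]}::{function_call}," for cid in sorted(seen))
--
--     return f'''
-- /// {doc_title}
-- ///
-- /// {doc_desc}
-- {signature} {{
--     match cluster_id {{
-- {match_arms_str}
--         _ => {error_msg},
--     }}
-- }}
-- '''
-- ===== Notes on version B (the rewrite author's own statement) =====
-- stated objective: alternative
-- what changed: Instead of sorting the whole cluster_info list and deduplicating with a seen-set while appending arm strings during the sorted scan, B makes one pass over cluster_info in original order building a first-wins dict cluster_id -> module_name and then emits one match arm per sorted dict key (stability of Python's sort makes the per-id winner identical).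
import Mathlib
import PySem

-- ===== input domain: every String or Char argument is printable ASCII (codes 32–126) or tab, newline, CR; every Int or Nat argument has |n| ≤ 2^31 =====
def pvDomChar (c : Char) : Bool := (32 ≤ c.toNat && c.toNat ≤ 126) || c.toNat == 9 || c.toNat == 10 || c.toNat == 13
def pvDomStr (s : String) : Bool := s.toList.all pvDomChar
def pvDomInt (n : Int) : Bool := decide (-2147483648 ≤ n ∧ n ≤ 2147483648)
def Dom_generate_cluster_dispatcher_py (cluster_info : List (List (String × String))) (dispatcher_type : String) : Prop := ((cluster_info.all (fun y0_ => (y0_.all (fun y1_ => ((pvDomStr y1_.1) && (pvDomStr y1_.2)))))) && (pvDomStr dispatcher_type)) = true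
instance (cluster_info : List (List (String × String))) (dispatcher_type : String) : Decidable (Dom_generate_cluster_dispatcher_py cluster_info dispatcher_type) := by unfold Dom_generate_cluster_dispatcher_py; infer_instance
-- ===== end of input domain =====

-- B replaces A's sort-the-whole-list-then-scan-with-a-seen-set by a single pass over the
-- ORIGINAL list building a cluster_id -> module_name table, then emits one arm per sorted
-- table key (objective: alternative, same cost; equivalence is about the return value).

-- Shared text helpers (this code is character-for-character identical in Source A and Source B):
-- info[k] on a Python dict, ported via PySem.Dict first-match lookup (total under Pre_, which
-- requires the subscripted keys to be present and keys to be duplicate-free).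
def pvGetS (info : List (String × String)) (k : String) : String :=
  PySem.Dict.getD (PySem.Dict.mk info) k ""

-- the f-string of one match arm
def pvArm (cid module_name function_call : String) : String :=
  "        " ++ cid ++ " => " ++ module_name ++ "::" ++ function_call ++ ","

-- the if/else selecting (function_call, doc_title, doc_desc, signature, error_msg)
def pvCfg (dispatcher_type : String) : String × String × String × String × String :=
  if dispatcher_type == "command" then
    ("decode_attribute_json(cluster_id, attribute_id, tlv_value)",
     "Main dispatcher function for decoding attributes to JSON",
     "This function routes to the appropriate cluster-specific decoder based on cluster ID.\n///\n/// # Parameters\n/// * `cluster_id` - The cluster identifier\n/// * `attribute_id` - The attribute identifier\n/// * `tlv_value` - The TLV value to decode\n///\n/// # Returns\n/// JSON string representation of the decoded value or error message",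
     "pub fn decode_attribute_json(cluster_id: u32, attribute_id: u32, tlv_value: &crate::tlv::TlvItemValue) -> String",
     "format!(\"{{\\\"error\\\": \\\"Unsupported cluster ID: {}\\\"}}\", cluster_id)")
  else
    ("get_attribute_list()",
     "Main dispatcher function for getting attribute lists",
     "This function routes to the appropriate cluster-specific attribute list based on cluster ID.\n///\n/// # Parameters\n/// * `cluster_id` - The cluster identifier\n///\n/// # Returns\n/// Vector of tuples containing (attribute_id, attribute_name) or empty vector if unsupported",
     "pub fn get_attribute_list(cluster_id: u32) -> Vec<(u32, &'static str)>",
     "vec![]")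

-- the final f-string template
def pvRender (cfg : String × String × String × String × String) (match_arms_str : String) : String :=
  "\n/// " ++ cfg.2.1 ++ "\n///\n/// " ++ cfg.2.2.1 ++ "\n" ++ cfg.2.2.2.1 ++
  " {\n    match cluster_id {\n" ++ match_arms_str ++ "\n        _ => " ++ cfg.2.2.2.2 ++ ",\n    }\n}\n"

-- ===== PORT A =====
-- sorted(cluster_info, key=…), then one scan keeping a seen-set and appending arm strings
def generate_cluster_dispatcher_py (cluster_info : List (List (String × String))) (dispatcher_type : String) : String :=
  let cfg := pvCfg dispatcher_type
  let st := (PySem.List.sorted cluster_info (fun x => pvGetS x "cluster_id") false).foldl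
    (fun (st : PySem.Set String × List String) info =>
      if pvGetS info "has_attributes" ≠ "" ∧ PySem.Set.contains st.1 (pvGetS info "cluster_id") = false then
        (PySem.Set.add st.1 (pvGetS info "cluster_id"),
         st.2 ++ [pvArm (pvGetS info "cluster_id") (pvGetS info "module_name") cfg.1])
      else st) (PySem.Set.empty, [])
  pvRender cfg (PySem.Str.join "\n" st.2)

-- ===== PORT B =====
-- one original-order pass building a Dict cluster_id -> module_name, then one arm per sorted key
def generate_cluster_dispatcher_py_alt (cluster_info : List (List (String × String))) (dispatcher_type : String) : String :=
  let cfg := pvCfg dispatcher_type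
  let seen := cluster_info.foldl
    (fun (d : PySem.Dict String String) info =>
      if pvGetS info "has_attributes" ≠ "" ∧ d.contains (pvGetS info "cluster_id") = false then
        d.insert (pvGetS info "cluster_id") (pvGetS info "module_name")
      else d) PySem.Dict.empty
  let arms := (PySem.List.sorted seen.keys (fun c => c) false).map
    (fun cid => pvArm cid (PySem.Dict.getD seen cid "") cfg.1)
  pvRender cfg (PySem.Str.join "\n" arms)

-- ===== PRECONDITION & SPEC =====
-- Pre_ excludes association lists with duplicate keys inside one dict (a Python dict cannot
-- carry them, so first-match reading of such a list is not A's input) and exactly the inputs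
-- on which A raises KeyError: a dict missing 'cluster_id' or 'has_attributes' (both are
-- subscripted for every record, by the sort key resp. the condition), or a record that is the
-- FIRST truthy occurrence of its cluster_id — the per-id winner both programs subscript for
-- 'module_name' — lacking that key; later duplicates and falsy records may lack it (A returns
-- normally there, and such inputs are inside Pre_).
def Pre_generate_cluster_dispatcher_py (cluster_info : List (List (String × String))) (dispatcher_type : String) : Prop :=
  (∀ info ∈ cluster_info, (info.map Prod.fst).Nodup ∧
    "cluster_id" ∈ info.map Prod.fst ∧ "has_attributes" ∈ info.map Prod.fst) ∧
  (∀ i ∈ List.range cluster_info.length,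
     pvGetS (cluster_info.getD i []) "has_attributes" ≠ "" →
     (∀ j ∈ List.range i,
        ¬(pvGetS (cluster_info.getD j []) "has_attributes" ≠ "" ∧
          pvGetS (cluster_info.getD j []) "cluster_id" = pvGetS (cluster_info.getD i []) "cluster_id")) →
     "module_name" ∈ (cluster_info.getD i []).map Prod.fst)
instance (cluster_info : List (List (String × String))) (dispatcher_type : String) : Decidable (Pre_generate_cluster_dispatcher_py cluster_info dispatcher_type) := by unfold Pre_generate_cluster_dispatcher_py; infer_instance

def pvWitness_generate_cluster_dispatcher_py : (List (List (String × String))) × String :=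
  ([[("cluster_id", "1"), ("has_attributes", "x"), ("module_name", "m")],
    [("cluster_id", "1"), ("has_attributes", "y")],
    [("cluster_id", "0"), ("has_attributes", "")]], "command")

def Spec_generate_cluster_dispatcher_py (cluster_info : List (List (String × String))) (dispatcher_type : String) (out : String) : Prop := out = generate_cluster_dispatcher_py_alt cluster_info dispatcher_type
instance (cluster_info : List (List (String × String))) (dispatcher_type : String) (out : String) : Decidable (Spec_generate_cluster_dispatcher_py cluster_info dispatcher_type out) := by unfold Spec_generate_cluster_dispatcher_py; infer_instance

-- ===== CLAIM (what is proved, stated in full; the proofs are below) =====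
def Claim_equal_generate_cluster_dispatcher_py : Prop := ∀ (cluster_info : List (List (String × String))) (dispatcher_type : String), Dom_generate_cluster_dispatcher_py cluster_info dispatcher_type → Pre_generate_cluster_dispatcher_py cluster_info dispatcher_type → Spec_generate_cluster_dispatcher_py cluster_info dispatcher_type (generate_cluster_dispatcher_py cluster_info dispatcher_type)

-- ===== LEMMAS AND PROOFS =====

-- The (cluster_id, module_name) pairs a scan of L with already-seen key set S selects:
-- first qualifying entry per unseen cluster_id, in scan order.
def pvSel : List (List (String × String)) → List String → List (String × String)
  | [], _ => []
  | e :: t, S =>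
    if pvGetS e "has_attributes" ≠ "" ∧ PySem.Set.contains S (pvGetS e "cluster_id") = false then
      (pvGetS e "cluster_id", pvGetS e "module_name") :: pvSel t (S ++ [pvGetS e "cluster_id"])
    else pvSel t S

theorem pvA_fold (fc : String) (L : List (List (String × String))) (S : PySem.Set String) (R : List String) :
    (L.foldl
      (fun (st : PySem.Set String × List String) info =>
        if pvGetS info "has_attributes" ≠ "" ∧ PySem.Set.contains st.1 (pvGetS info "cluster_id") = false then
          (PySem.Set.add st.1 (pvGetS info "cluster_id"),
           st.2 ++ [pvArm (pvGetS info "cluster_id") (pvGetS info "module_name") fc])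
        else st) (S, R)).2
    = R ++ (pvSel L S).map (fun p => pvArm p.1 p.2 fc) := by
  induction L generalizing S R with
  | nil => simp [pvSel]
  | cons e t ih =>
    simp only [List.foldl_cons, pvSel]
    by_cases h : pvGetS e "has_attributes" ≠ "" ∧ PySem.Set.contains S (pvGetS e "cluster_id") = false
    · rw [if_pos h, if_pos h]
      have hadd : PySem.Set.add S (pvGetS e "cluster_id") = S ++ [pvGetS e "cluster_id"] := by
        simp [PySem.Set.add]
        simpa using h.2
      rw [hadd, ih]
      simp
    · rw [if_neg h, if_neg h, ih]

theorem pvB_fold (L : List (List (String × String))) (d : PySem.Dict String String) (hnd : d.keys.Nodup) :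
    (L.foldl
      (fun (d : PySem.Dict String String) info =>
        if pvGetS info "has_attributes" ≠ "" ∧ d.contains (pvGetS info "cluster_id") = false then
          d.insert (pvGetS info "cluster_id") (pvGetS info "module_name")
        else d) d).items
    = d.items ++ pvSel L d.keys := by
  induction L generalizing d with
  | nil => simp [pvSel]
  | cons e t ih =>
    simp only [List.foldl_cons, pvSel]
    have hcc : d.contains (pvGetS e "cluster_id") = PySem.Set.contains d.keys (pvGetS e "cluster_id") := by
      rw [PySem.Dict.contains_eq_decide_mem_keys]
      simp [PySem.Set.contains]
    by_cases h : pvGetS e "has_attributes" ≠ "" ∧ d.contains (pvGetS e "cluster_id") = false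
    · rw [if_pos h, if_pos (by rw [← hcc]; exact h)]
      have hit := PySem.Dict.items_insert_of_not_contains (d := d) (k := pvGetS e "cluster_id") (v := pvGetS e "module_name") h.2
      have hk := PySem.Dict.keys_insert_of_not_contains (d := d) (k := pvGetS e "cluster_id") (v := pvGetS e "module_name") h.2
      have hmem : pvGetS e "cluster_id" ∉ d.keys := by
        have h2 := h.2
        rw [PySem.Dict.contains_eq_decide_mem_keys] at h2
        simpa using h2
      have hnd' : (d.insert (pvGetS e "cluster_id") (pvGetS e "module_name")).keys.Nodup := by
        rw [hk]
        refine List.Nodup.append hnd (List.nodup_singleton _) ?_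
        simpa [List.disjoint_singleton] using hmem
      rw [ih _ hnd', hit, hk, List.append_assoc]
      simp
    · rw [if_neg h, if_neg (by rw [← hcc]; exact h), ih d hnd]

theorem pvSel_keys_sublist (L : List (List (String × String))) (S : List String) :
    ((pvSel L S).map Prod.fst).Sublist (L.map (fun e => pvGetS e "cluster_id")) := by
  induction L generalizing S with
  | nil => simp [pvSel]
  | cons e t ih =>
    simp only [pvSel, List.map_cons]
    by_cases h : pvGetS e "has_attributes" ≠ "" ∧ PySem.Set.contains S (pvGetS e "cluster_id") = false
    · rw [if_pos h]
      simpa using List.Sublist.cons₂ (pvGetS e "cluster_id") (ih (S ++ [pvGetS e "cluster_id"]))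
    · rw [if_neg h]
      exact List.Sublist.cons _ (ih _)

theorem pvSel_keys_nodup (L : List (List (String × String))) (S : List String) :
    ((pvSel L S).map Prod.fst).Nodup ∧ ∀ c ∈ (pvSel L S).map Prod.fst, c ∉ S := by
  induction L generalizing S with
  | nil => simp [pvSel]
  | cons e t ih =>
    simp only [pvSel]
    by_cases h : pvGetS e "has_attributes" ≠ "" ∧ PySem.Set.contains S (pvGetS e "cluster_id") = false
    · rw [if_pos h]
      obtain ⟨ihn, ihf⟩ := ih (S ++ [pvGetS e "cluster_id"])
      refine ⟨?_, ?_⟩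
      · simp only [List.map_cons, List.nodup_cons]
        refine ⟨fun hc => ?_, ihn⟩
        exact ihf _ hc (by simp)
      · intro c hc hcS
        simp only [List.map_cons, List.mem_cons] at hc
        rcases hc with rfl | hc
        · have := h.2
          simp [PySem.Set.contains] at this
          exact this hcS
        · exact ihf _ hc (by simp [hcS])
    · rw [if_neg h]
      exact ih S

theorem pvSel_mem_iff (L : List (List (String × String))) (S : List String) (c v : String) (hc : c ∉ S) :
    ((c, v) ∈ pvSel L S ↔
      (L.find? (fun e => decide (pvGetS e "has_attributes" ≠ "") && (pvGetS e "cluster_id" == c))).map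
        (fun e => pvGetS e "module_name") = some v) := by
  induction L generalizing S with
  | nil => simp [pvSel]
  | cons e t ih =>
    simp only [pvSel]
    by_cases h : pvGetS e "has_attributes" ≠ "" ∧ PySem.Set.contains S (pvGetS e "cluster_id") = false
    · rw [if_pos h]
      by_cases hk : pvGetS e "cluster_id" = c
      · have hfind : (e :: t).find? (fun e => decide (pvGetS e "has_attributes" ≠ "") && (pvGetS e "cluster_id" == c)) = some e := by
          rw [List.find?_cons_of_pos]
          simp [h.1, hk]
        rw [hfind]
        simp only [Option.map_some, Option.some.injEq, List.mem_cons, Prod.mk.injEq]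
        constructor
        · rintro (⟨-, rfl⟩ | hmem)
          · rfl
          · exfalso
            have := (pvSel_keys_nodup t (S ++ [pvGetS e "cluster_id"])).2
            have hcin : c ∈ (pvSel t (S ++ [pvGetS e "cluster_id"])).map Prod.fst :=
              List.mem_map_of_mem (f := Prod.fst) hmem
            exact this c hcin (by simp [hk])
        · rintro rfl
          exact Or.inl ⟨hk.symm, rfl⟩
      · have hfind : (e :: t).find? (fun e => decide (pvGetS e "has_attributes" ≠ "") && (pvGetS e "cluster_id" == c)) = t.find? (fun e => decide (pvGetS e "has_attributes" ≠ "") && (pvGetS e "cluster_id" == c)) := by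
          rw [List.find?_cons_of_neg]
          simp [hk]
        rw [hfind]
        have hc' : c ∉ S ++ [pvGetS e "cluster_id"] := by
          simp [hc, Ne.symm hk]
        rw [← ih _ hc']
        simp only [List.mem_cons, Prod.mk.injEq]
        constructor
        · rintro (⟨rfl, -⟩ | hmem)
          · exact absurd rfl hk
          · exact hmem
        · exact fun hmem => Or.inr hmem
    · rw [if_neg h]
      push Not at h
      by_cases hq : pvGetS e "has_attributes" ≠ ""
      · have hS : PySem.Set.contains S (pvGetS e "cluster_id") = true := by
          cases hcase : PySem.Set.contains S (pvGetS e "cluster_id") with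
          | false => exact absurd hcase (h hq)
          | true => rfl
        have hk : pvGetS e "cluster_id" ≠ c := by
          intro hkc
          apply hc
          rw [← hkc]
          simpa [PySem.Set.contains] using hS
        rw [ih S hc]
        rw [List.find?_cons_of_neg]
        simp [hk]
      · rw [ih S hc]
        rw [List.find?_cons_of_neg]
        simp at hq
        simp [hq]

theorem pv_insertBy_pairwise (x : List (String × String)) (ys : List (List (String × String)))
    (h : ys.Pairwise (fun a b => pvGetS a "cluster_id" ≤ pvGetS b "cluster_id")) :
    (PySem.List.insertBy (fun a b => decide (pvGetS a "cluster_id" < pvGetS b "cluster_id")) x ys).Pairwise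
      (fun a b => pvGetS a "cluster_id" ≤ pvGetS b "cluster_id") := by
  induction ys with
  | nil => simp [PySem.List.insertBy]
  | cons y t ih =>
    rw [List.pairwise_cons] at h
    obtain ⟨hy, ht⟩ := h
    simp only [PySem.List.insertBy]
    by_cases hlt : pvGetS x "cluster_id" < pvGetS y "cluster_id"
    · rw [if_pos (by simpa using hlt)]
      refine List.Pairwise.cons ?_ (List.Pairwise.cons hy ht)
      intro z hz
      rcases List.mem_cons.mp hz with rfl | hz
      · exact le_of_lt hlt
      · exact le_trans (le_of_lt hlt) (hy z hz)
    · rw [if_neg (by simpa using hlt)]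
      refine List.Pairwise.cons ?_ (ih ht)
      intro z hz
      rcases (PySem.List.mem_insertBy _ x z t).mp hz with rfl | hz
      · exact le_of_not_gt hlt
      · exact hy z hz

theorem pv_filter_insertBy (c : String) (p : List (String × String) → Bool)
    (hp : ∀ e, p e = true → pvGetS e "cluster_id" = c)
    (x : List (String × String)) (ys : List (List (String × String)))
    (h : ys.Pairwise (fun a b => pvGetS a "cluster_id" ≤ pvGetS b "cluster_id")) :
    (PySem.List.insertBy (fun a b => decide (pvGetS a "cluster_id" < pvGetS b "cluster_id")) x ys).filter p
      = if p x then ys.filter p ++ [x] else ys.filter p := by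
  induction ys with
  | nil =>
    simp only [PySem.List.insertBy, List.nil_append, List.filter]
    split <;> simp_all
  | cons y t ih =>
    rw [List.pairwise_cons] at h
    obtain ⟨hy, ht⟩ := h
    simp only [PySem.List.insertBy]
    by_cases hlt : pvGetS x "cluster_id" < pvGetS y "cluster_id"
    · rw [if_pos (by simpa using hlt)]
      by_cases hpx : p x = true
      · have hxc : pvGetS x "cluster_id" = c := hp x hpx
        have hnone : (y :: t).filter p = [] := by
          rw [List.filter_eq_nil_iff]
          intro z hz hpz
          have hzc : pvGetS z "cluster_id" = c := hp z hpz
          have hge : pvGetS y "cluster_id" ≤ pvGetS z "cluster_id" := by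
            rcases List.mem_cons.mp hz with rfl | hz
            · exact le_refl _
            · exact hy z hz
          rw [hzc, ← hxc] at hge
          exact absurd hge (not_le.mpr hlt)
        rw [List.filter_cons_of_pos hpx, hnone]
        simp [hpx]
      · simp only [Bool.not_eq_true] at hpx
        rw [List.filter_cons_of_neg (by simp [hpx])]
        simp [hpx]
    · rw [if_neg (by simpa using hlt)]
      by_cases hpy : p y = true
      · rw [List.filter_cons_of_pos hpy, ih ht]
        by_cases hpx : p x = true
        · simp [hpx, List.filter_cons_of_pos hpy]
        · simp only [Bool.not_eq_true] at hpx
          simp [hpx, List.filter_cons_of_pos hpy]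
      · simp only [Bool.not_eq_true] at hpy
        rw [List.filter_cons_of_neg (by simp [hpy]), ih ht, List.filter_cons_of_neg (by simp [hpy])]

theorem pv_filter_foldl_insertBy (c : String) (p : List (String × String) → Bool)
    (hp : ∀ e, p e = true → pvGetS e "cluster_id" = c)
    (L : List (List (String × String))) (acc : List (List (String × String)))
    (h : acc.Pairwise (fun a b => pvGetS a "cluster_id" ≤ pvGetS b "cluster_id")) :
    (L.foldl (fun acc x => PySem.List.insertBy (fun a b => decide (pvGetS a "cluster_id" < pvGetS b "cluster_id")) x acc) acc).filter p
      = acc.filter p ++ L.filter p := by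
  induction L generalizing acc with
  | nil => simp
  | cons x t ih =>
    rw [List.foldl_cons, ih _ (pv_insertBy_pairwise x acc h), pv_filter_insertBy c p hp x acc h]
    by_cases hpx : p x = true
    · rw [if_pos hpx, List.filter_cons_of_pos hpx]
      simp
    · simp only [Bool.not_eq_true] at hpx
      rw [if_neg (by simp [hpx]), List.filter_cons_of_neg (by simp [hpx])]

theorem pv_filter_sorted (L : List (List (String × String))) (c : String) (p : List (String × String) → Bool)
    (hp : ∀ e, p e = true → pvGetS e "cluster_id" = c) :
    (PySem.List.sorted L (fun x => pvGetS x "cluster_id") false).filter p = L.filter p := by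
  rw [PySem.List.sorted_eq_foldl_insertBy]
  simpa using pv_filter_foldl_insertBy c p hp L [] (by simp)

theorem pv_find?_sorted (L : List (List (String × String))) (c : String) :
    (PySem.List.sorted L (fun x => pvGetS x "cluster_id") false).find?
        (fun e => decide (pvGetS e "has_attributes" ≠ "") && (pvGetS e "cluster_id" == c))
      = L.find? (fun e => decide (pvGetS e "has_attributes" ≠ "") && (pvGetS e "cluster_id" == c)) := by
  rw [← List.head?_filter, ← List.head?_filter,
    pv_filter_sorted L c _ (by intro e he; simp at he; exact he.2)]

theorem pv_main (ci : List (List (String × String))) :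
    let M := PySem.List.sorted ci (fun x => pvGetS x "cluster_id") false
    let P := pvSel ci []
    let Q := pvSel M []
    Q.Perm P ∧ PySem.List.sorted (P.map Prod.fst) (fun c => c) false = Q.map Prod.fst := by
  intro M P Q
  have hQP : Q.Perm P := by
    rw [List.perm_ext_iff_of_nodup
      (List.Nodup.of_map Prod.fst (pvSel_keys_nodup M []).1)
      (List.Nodup.of_map Prod.fst (pvSel_keys_nodup ci []).1)]
    rintro ⟨c, v⟩
    rw [pvSel_mem_iff M [] c v (by simp), pvSel_mem_iff ci [] c v (by simp), pv_find?_sorted]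
  refine ⟨hQP, ?_⟩
  apply PySem.List.sorted_eq_of_perm_of_pairwise_lt
  · exact hQP.map Prod.fst
  · have hle : (Q.map Prod.fst).Pairwise (fun a b => a ≤ b) := by
      have hsub := pvSel_keys_sublist M []
      have hpw := PySem.List.sorted_map_key_pairwise (xs := ci) (key := fun x => pvGetS x "cluster_id")
      exact hpw.sublist hsub
    have hnd : (Q.map Prod.fst).Nodup := (pvSel_keys_nodup M []).1
    have := hle.and hnd
    exact this.imp (fun h => lt_of_le_of_ne h.1 h.2)

-- ===== VERDICT (by name: the statement is the Claim_ definition above) =====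
theorem generate_cluster_dispatcher_py_spec : Claim_equal_generate_cluster_dispatcher_py := by
  intro ci dt _hdom _hpre
  unfold Spec_generate_cluster_dispatcher_py
  unfold generate_cluster_dispatcher_py generate_cluster_dispatcher_py_alt
  dsimp only
  rw [pvA_fold]
  obtain ⟨hQP, hsorted⟩ := pv_main ci
  set M := PySem.List.sorted ci (fun x => pvGetS x "cluster_id") false with hM
  set P := pvSel ci [] with hP
  set Q := pvSel M [] with hQ
  have hB := pvB_fold ci PySem.Dict.empty (by simp)
  set dP := ci.foldl
      (fun (d : PySem.Dict String String) info =>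
        if pvGetS info "has_attributes" ≠ "" ∧ d.contains (pvGetS info "cluster_id") = false then
          d.insert (pvGetS info "cluster_id") (pvGetS info "module_name")
        else d) PySem.Dict.empty with hdP
  have hitems : dP.items = P := by
    rw [hB]; simp [hP, PySem.Dict.empty]
  have hkeys : dP.keys = P.map Prod.fst := by
    simp only [PySem.Dict.keys, hitems]
  have hknd : dP.keys.Nodup := by
    rw [hkeys]; exact (pvSel_keys_nodup ci []).1
  rw [hkeys, hsorted, List.map_map]
  congr 2
  apply List.map_congr_left
  intro p hp
  have hpP : (p.1, p.2) ∈ dP.items := by rw [hitems]; exact hQP.subset hp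
  have hget : PySem.Dict.getD dP p.1 "" = p.2 := PySem.Dict.getD_of_mem_items dP hpP hknd ""
  simp [Function.comp, hget]
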